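-- pv_equiv track=rewrite | github.com/dtcxzyw/llvm-opt-benchmark-nightly | scripts/ci.py | _build_minimized_files_from_hunks
-- ===== SOURCE A (Python) =====
-- from typing import Optional, List, Tuple
--
-- def _build_minimized_files_from_hunks(hunks: List[List[str]]) -> Optional[tuple]:
--     if not hunks:
--         return None
--
--     minimized_ref_lines = []
--     minimized_new_lines = []
--     for hunk_id, hunk_lines in enumerate(hunks):
--         begin_marker = f"begin_hunk_{hunk_id}"
--         end_marker = f"end_hunk_{hunk_id}"
--         minimized_ref_lines.append(begin_marker)
--         minimized_new_lines.append(begin_marker)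
--
--         for line in hunk_lines:
--             content = line[1:]
--             if line.startswith(" "):
--                 minimized_ref_lines.append(content)
--                 minimized_new_lines.append(content)
--             elif line.startswith("-"):
--                 minimized_ref_lines.append(content)
--             elif line.startswith("+"):
--                 minimized_new_lines.append(content)
--
--         minimized_ref_lines.append(end_marker)
--         minimized_new_lines.append(end_marker)
--
--     return minimized_ref_lines, minimized_new_lines
-- ===== SOURCE B (Python) =====
-- from typing import Optional, List, Tuple
--
-- def _build_minimized_files_from_hunks(hunks: List[List[str]]) -> Optional[tuple]:
--     if not hunks:
--         return None
--
--     def collect(keep):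
--         out = []
--         for hunk_id, hunk_lines in enumerate(hunks):
--             out.append(f"begin_hunk_{hunk_id}")
--             for line in hunk_lines:
--                 if line.startswith(keep):
--                     out.append(line[1:])
--             out.append(f"end_hunk_{hunk_id}")
--         return out
--
--     return collect((" ", "-")), collect((" ", "+"))
-- ===== Notes on version B (the rewrite author's own statement) =====
-- stated objective: simpler
-- what changed: Replaces the single pass that interleaves four-way branch updates of two parallel accumulator lists with a small helper parameterised by the tuple of kept prefixes, called once per output list (ref keeps ' '/'-', new keeps ' '/'+').
import Mathlib
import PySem

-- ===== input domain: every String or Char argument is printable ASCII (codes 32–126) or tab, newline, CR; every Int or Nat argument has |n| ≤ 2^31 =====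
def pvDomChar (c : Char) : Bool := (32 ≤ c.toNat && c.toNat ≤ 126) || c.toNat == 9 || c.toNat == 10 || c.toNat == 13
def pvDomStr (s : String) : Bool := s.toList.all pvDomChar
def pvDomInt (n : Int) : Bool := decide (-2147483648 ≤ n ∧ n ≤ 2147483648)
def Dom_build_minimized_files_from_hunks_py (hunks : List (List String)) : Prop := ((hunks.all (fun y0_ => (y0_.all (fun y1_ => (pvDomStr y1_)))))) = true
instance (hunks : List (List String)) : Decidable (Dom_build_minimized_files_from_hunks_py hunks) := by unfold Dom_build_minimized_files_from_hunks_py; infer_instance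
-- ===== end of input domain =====

-- B replaces A's single pass that interleaves updates of two parallel lists by a helper
-- parameterised by the kept prefixes, run once per output list (objective: simpler).

-- ===== PORT A =====
def build_minimized_files_from_hunks_py (hunks : List (List String)) : Option (List String × List String) :=
  if hunks = [] then none
  else
    let acc := (PySem.List.enumerate hunks).foldl (fun (acc : List String × List String) p =>
      let begin_marker := "begin_hunk_" ++ PySem.Int.toStr p.1
      let end_marker := "end_hunk_" ++ PySem.Int.toStr p.1
      let acc := (acc.1 ++ [begin_marker], acc.2 ++ [begin_marker])
      let acc := p.2.foldl (fun (acc : List String × List String) line =>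
        let content := PySem.Str.slice line (some 1) none
        if PySem.Str.startswith line " " then (acc.1 ++ [content], acc.2 ++ [content])
        else if PySem.Str.startswith line "-" then (acc.1 ++ [content], acc.2)
        else if PySem.Str.startswith line "+" then (acc.1, acc.2 ++ [content])
        else acc) acc
      (acc.1 ++ [end_marker], acc.2 ++ [end_marker])) ([], [])
    some acc

-- ===== PORT B =====
-- the local helper `collect(keep)` of Source B (the tuple of prefixes becomes a pair)
def pvCollect (hunks : List (List String)) (keep : String × String) : List String :=
  (PySem.List.enumerate hunks).foldl (fun out p =>
    let out := out ++ ["begin_hunk_" ++ PySem.Int.toStr p.1]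
    let out := p.2.foldl (fun out line =>
      if PySem.Str.startswith line keep.1 || PySem.Str.startswith line keep.2 then
        out ++ [PySem.Str.slice line (some 1) none]
      else out) out
    out ++ ["end_hunk_" ++ PySem.Int.toStr p.1]) []

def build_minimized_files_from_hunks_py_alt (hunks : List (List String)) : Option (List String × List String) :=
  if hunks = [] then none
  else some (pvCollect hunks (" ", "-"), pvCollect hunks (" ", "+"))

-- ===== PRECONDITION & SPEC =====
def Spec_build_minimized_files_from_hunks_py (hunks : List (List String)) (out : Option (List String × List String)) : Prop := out = build_minimized_files_from_hunks_py_alt hunks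
instance (hunks : List (List String)) (out : Option (List String × List String)) : Decidable (Spec_build_minimized_files_from_hunks_py hunks out) := by unfold Spec_build_minimized_files_from_hunks_py; infer_instance

-- ===== CLAIM (what is proved, stated in full; the proofs are below) =====
def Claim_equal_build_minimized_files_from_hunks_py : Prop := ∀ (hunks : List (List String)), Dom_build_minimized_files_from_hunks_py hunks → Spec_build_minimized_files_from_hunks_py hunks (build_minimized_files_from_hunks_py hunks)

-- ===== LEMMAS AND PROOFS =====

-- a list cannot start with two distinct single characters
theorem pv_sw_excl {l : List Char} {c d : Char} (hne : c ≠ d)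
    (h1 : PySem.Chars.startswith l [c] = true) :
    PySem.Chars.startswith l [d] = false := by
  rw [PySem.Chars.startswith_iff] at h1
  rw [Bool.eq_false_iff]
  intro h
  rw [PySem.Chars.startswith_iff] at h
  obtain ⟨t1, e1⟩ := h1
  obtain ⟨t2, e2⟩ := h
  rw [← e1] at e2
  exact hne (List.head_eq_of_cons_eq e2).symm

-- the inner loop: A's paired fold equals the two keep-filtered folds side by side
theorem pv_inner (lines : List String) (r n : List String) :
    lines.foldl (fun (acc : List String × List String) line =>
        let content := PySem.Str.slice line (some 1) none
        if PySem.Str.startswith line " " then (acc.1 ++ [content], acc.2 ++ [content])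
        else if PySem.Str.startswith line "-" then (acc.1 ++ [content], acc.2)
        else if PySem.Str.startswith line "+" then (acc.1, acc.2 ++ [content])
        else acc) (r, n)
    = (lines.foldl (fun out line =>
          if PySem.Str.startswith line " " || PySem.Str.startswith line "-" then
            out ++ [PySem.Str.slice line (some 1) none] else out) r,
       lines.foldl (fun out line =>
          if PySem.Str.startswith line " " || PySem.Str.startswith line "+" then
            out ++ [PySem.Str.slice line (some 1) none] else out) n) := by
  induction lines generalizing r n with
  | nil => rfl
  | cons line rest ih =>
    cases h1 : PySem.Str.startswith line " " with
    | true =>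
      simp only [List.foldl_cons, h1, Bool.true_or, ite_true, ih]
    | false =>
      cases h2 : PySem.Str.startswith line "-" with
      | true =>
        have h3 : PySem.Str.startswith line "+" = false := by
          rw [PySem.Str.startswith_eq] at h2 ⊢
          exact pv_sw_excl (by decide) h2
        simp only [List.foldl_cons, h1, h2, h3, Bool.false_or, Bool.false_eq_true,
          ite_true, ite_false, ih]
      | false =>
        cases h3 : PySem.Str.startswith line "+" with
        | true =>
          simp only [List.foldl_cons, h1, h2, h3, Bool.false_or, Bool.false_eq_true,
            ite_true, ite_false, ih]
        | false =>
          simp only [List.foldl_cons, h1, h2, h3, Bool.false_or, Bool.false_eq_true,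
            ite_true, ite_false, ih]

-- the outer loop over the enumerated hunks
theorem pv_outer (es : List (Int × List String)) (r n : List String) :
    es.foldl (fun (acc : List String × List String) p =>
      let begin_marker := "begin_hunk_" ++ PySem.Int.toStr p.1
      let end_marker := "end_hunk_" ++ PySem.Int.toStr p.1
      let acc := (acc.1 ++ [begin_marker], acc.2 ++ [begin_marker])
      let acc := p.2.foldl (fun (acc : List String × List String) line =>
        let content := PySem.Str.slice line (some 1) none
        if PySem.Str.startswith line " " then (acc.1 ++ [content], acc.2 ++ [content])
        else if PySem.Str.startswith line "-" then (acc.1 ++ [content], acc.2)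
        else if PySem.Str.startswith line "+" then (acc.1, acc.2 ++ [content])
        else acc) acc
      (acc.1 ++ [end_marker], acc.2 ++ [end_marker])) (r, n)
    = (es.foldl (fun out p =>
        (p.2.foldl (fun out line =>
          if PySem.Str.startswith line " " || PySem.Str.startswith line "-" then
            out ++ [PySem.Str.slice line (some 1) none] else out)
          (out ++ ["begin_hunk_" ++ PySem.Int.toStr p.1])) ++ ["end_hunk_" ++ PySem.Int.toStr p.1]) r,
       es.foldl (fun out p =>
        (p.2.foldl (fun out line =>
          if PySem.Str.startswith line " " || PySem.Str.startswith line "+" then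
            out ++ [PySem.Str.slice line (some 1) none] else out)
          (out ++ ["begin_hunk_" ++ PySem.Int.toStr p.1])) ++ ["end_hunk_" ++ PySem.Int.toStr p.1]) n) := by
  simp only [pv_inner]
  exact PySem.List.foldl_prod_mk
    (fun out p =>
      (p.2.foldl (fun out line =>
        if PySem.Str.startswith line " " || PySem.Str.startswith line "-" then
          out ++ [PySem.Str.slice line (some 1) none] else out)
        (out ++ ["begin_hunk_" ++ PySem.Int.toStr p.1])) ++ ["end_hunk_" ++ PySem.Int.toStr p.1])
    (fun out p =>
      (p.2.foldl (fun out line =>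
        if PySem.Str.startswith line " " || PySem.Str.startswith line "+" then
          out ++ [PySem.Str.slice line (some 1) none] else out)
        (out ++ ["begin_hunk_" ++ PySem.Int.toStr p.1])) ++ ["end_hunk_" ++ PySem.Int.toStr p.1])
    es r n

-- ===== VERDICT (by name: the statement is the Claim_ definition above) =====
theorem build_minimized_files_from_hunks_py_spec : Claim_equal_build_minimized_files_from_hunks_py := by
  intro hunks _
  unfold Spec_build_minimized_files_from_hunks_py
  unfold build_minimized_files_from_hunks_py build_minimized_files_from_hunks_py_alt pvCollect
  by_cases h : hunks = []
  · simp [h]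
  · simp only [h, ite_false, Option.some.injEq]
    exact pv_outer _ [] []
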